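-- pv_equiv track=rewrite | github.com/AtikHasan169/Gmail-Bot | app/utils/email_case.py | generate
-- ===== SOURCE A (Python) =====
-- from itertools import product
--
-- def generate(email, limit=500):
--     local, domain = email.split("@", 1)
--
--     chars = []
--     for c in local:
--         if c.isalpha():
--             chars.append((c.lower(), c.upper()))
--         else:
--             chars.append((c,))
--
--     result = []
--     for combo in product(*chars):
--         result.append("".join(combo) + "@" + domain)
--         if len(result) >= limit:
--             break
--
--     return result
-- ===== SOURCE B (Python) =====
-- def generate(email, limit=500):
--     local, domain = email.split("@", 1)
--     k = sum(c.isalpha() for c in local)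
--     count = min(1 << k, max(limit, 1))
--     out = []
--     for i in range(count):
--         j = i
--         rev = []
--         for c in reversed(local):
--             if c.isalpha():
--                 rev.append(c.upper() if j & 1 else c.lower())
--                 j >>= 1
--             else:
--                 rev.append(c)
--         out.append("".join(reversed(rev)) + "@" + domain)
--     return out
-- ===== Notes on version B (the rewrite author's own statement) =====
-- stated objective: alternative
-- what changed: Replaces itertools.product enumeration of all case tuples with direct bitmask decoding: the count of results min(2^k, max(limit,1)) is computed up front and the i-th variant is decoded from the bits of i (last alphabetic character = least significant bit), preserving product's rightmost-fastest order.
import Mathlib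
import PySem

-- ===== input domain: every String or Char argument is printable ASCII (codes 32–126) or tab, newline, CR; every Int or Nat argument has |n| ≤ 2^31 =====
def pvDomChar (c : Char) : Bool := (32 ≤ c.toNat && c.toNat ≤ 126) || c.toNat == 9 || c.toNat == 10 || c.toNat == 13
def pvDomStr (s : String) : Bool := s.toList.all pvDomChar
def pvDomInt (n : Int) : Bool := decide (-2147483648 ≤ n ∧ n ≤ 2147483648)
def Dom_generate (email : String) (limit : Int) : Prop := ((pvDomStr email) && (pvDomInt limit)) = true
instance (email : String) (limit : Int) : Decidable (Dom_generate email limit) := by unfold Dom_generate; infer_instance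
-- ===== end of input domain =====

-- B replaces A's itertools.product enumeration by direct bitmask decoding: the i-th
-- requested variant is computed from the bits of i (last alphabetic position = least
-- significant bit, matching product's rightmost-fastest order), so only the first
-- min(2^k, max(limit,1)) variants are ever materialised. Objective: alternative.

-- ===== PORT A =====
-- options for one character: (c.lower(), c.upper()) if alphabetic else (c,)
def optsA (c : Char) : List Char :=
  if PySem.Chars.isalpha c then [PySem.Chars.lowerChar c, PySem.Chars.upperChar c] else [c]

-- itertools.product(*chars): leftmost factor varies slowest (rightmost fastest)
def productC : List (List Char) → List (List Char)
  | [] => [[]]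
  | l :: ls => l.flatMap (fun o => (productC ls).map (o :: ·))

-- the 'for combo in product(...): append; if len(result) >= limit: break' loop
-- ("".join(combo) + "@" + domain is built as String.mk over the character lists — exact)
def loopA (domain : List Char) (limit : Int) : List (List Char) → List String → List String
  | [], res => res
  | c :: rest, res =>
      let res' := res ++ [String.mk (c ++ '@' :: domain)]
      if limit ≤ (res'.length : Int) then res' else loopA domain limit rest res'

def generate (email : String) (limit : Int) : List String :=
  -- email.split("@", 1) unpacked into (local, domain); anything but exactly two parts
  -- is a Python ValueError (excluded by Pre_generate) — the port returns [] there
  match PySem.Str.splitMax? email "@" 1 with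
  | some [lo, dom] =>
      let chars := lo.toList.map optsA
      loopA dom.toList limit (productC chars) []
  | _ => []

-- ===== PORT B =====
def generate_alt (email : String) (limit : Int) : List String :=
  -- email.split("@", 1) unpacked into (local, domain); not exactly two parts is a
  -- Python ValueError (excluded by Pre_generate) -- the port returns [] there
  match PySem.Str.splitMax? email "@" 1 with
  | none => []
  | some parts =>
    match parts with
    | [] => []
    | [_] => []
    | _ :: _ :: _ :: _ => []
    | [lo, dom] =>
      let lT := lo.toList
      let dT := dom.toList
      -- k = sum(c.isalpha() for c in local)
      let k := (lT.filter PySem.Chars.isalpha).length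
      -- count = min(1 << k, max(limit, 1)); always >= 1, so .toNat is exact for range(count)
      let count : Int := min ((2 : Int) ^ k) (max limit 1)
      (List.range count.toNat).map (fun i =>
        -- inner loop over reversed(local), consuming bits of i from the low end
        -- (j & 1 ported as % 2, j >>= 1 as / 2 -- exact on Nat)
        let p := lT.reverse.foldl
          (fun (acc : List Char × Nat) c =>
            if PySem.Chars.isalpha c then
              (acc.1 ++ [if acc.2 % 2 = 1 then PySem.Chars.upperChar c else PySem.Chars.lowerChar c],
               acc.2 / 2)
            else (acc.1 ++ [c], acc.2))
          ([], i)
        String.mk (p.1.reverse ++ '@' :: dT))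

-- ===== PRECONDITION & SPEC =====
-- Pre_ excludes exactly the e-mails without '@', on which A's two-variable unpacking
-- of email.split("@", 1) raises ValueError (B raises identically there).
def Pre_generate (email : String) (limit : Int) : Prop := '@' ∈ email.toList
instance (email : String) (limit : Int) : Decidable (Pre_generate email limit) := by
  unfold Pre_generate; infer_instance

def pvWitness_generate : String × Int := ("ab@x.com", 3)

def Spec_generate (email : String) (limit : Int) (out : List String) : Prop := out = generate_alt email limit
instance (email : String) (limit : Int) (out : List String) : Decidable (Spec_generate email limit out) := by unfold Spec_generate; infer_instance

-- ===== CLAIM (what is proved, stated in full; the proofs are below) =====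
def Claim_equal_generate : Prop := ∀ (email : String) (limit : Int), Dom_generate email limit → Pre_generate email limit → Spec_generate email limit (generate email limit)

-- ===== LEMMAS AND PROOFS =====

-- number of alphabetic characters (bit width of the case space)
def kAl (l : List Char) : Nat := (l.filter PySem.Chars.isalpha).length

-- structural right-to-left bit decoder: returns the decoded variant and the leftover bits
def decode : List Char → Nat → List Char × Nat
  | [], j => ([], j)
  | c :: rest, j =>
      let t := decode rest j
      if PySem.Chars.isalpha c then
        ((if t.2 % 2 = 1 then PySem.Chars.upperChar c else PySem.Chars.lowerChar c) :: t.1, t.2 / 2)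
      else (c :: t.1, t.2)

theorem decode_cons (c : Char) (rest : List Char) (j : Nat) :
    decode (c :: rest) j =
      if PySem.Chars.isalpha c then
        ((if (decode rest j).2 % 2 = 1 then PySem.Chars.upperChar c else PySem.Chars.lowerChar c)
            :: (decode rest j).1, (decode rest j).2 / 2)
      else (c :: (decode rest j).1, (decode rest j).2) := rfl

theorem kAl_cons (c : Char) (l : List Char) :
    kAl (c :: l) = if PySem.Chars.isalpha c then kAl l + 1 else kAl l := by
  by_cases h : PySem.Chars.isalpha c <;> simp [kAl, List.filter, h]

theorem decode_split (l : List Char) (q r : Nat) (h : r < 2 ^ kAl l) :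
    decode l (q * 2 ^ kAl l + r) = ((decode l r).1, q) := by
  induction l generalizing q r with
  | nil =>
      simp [kAl] at h
      simp [decode, kAl, h]
  | cons c rest ih =>
      rw [kAl_cons] at h
      by_cases hc : PySem.Chars.isalpha c
      · rw [if_pos hc] at h
        have hm : 0 < 2 ^ kAl rest := Nat.two_pow_pos _
        have h2m : r < 2 ^ kAl rest * 2 := by rw [pow_succ] at h; exact h
        obtain ⟨b, r', hblt, hr'lt, hr⟩ :
            ∃ b r', b < 2 ∧ r' < 2 ^ kAl rest ∧ r = b * 2 ^ kAl rest + r' :=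
          ⟨r / 2 ^ kAl rest, r % 2 ^ kAl rest,
            Nat.div_lt_of_lt_mul h2m,
            Nat.mod_lt _ hm, (Nat.div_add_mod' r _).symm⟩
        have key : q * 2 ^ kAl (c :: rest) + r = (2 * q + b) * 2 ^ kAl rest + r' := by
          rw [kAl_cons, if_pos hc, pow_succ, hr]; ring
        rw [key, hr]
        have h1 := ih (2 * q + b) r' hr'lt
        have h2 := ih b r' hr'lt
        simp only [decode_cons, h1, h2]
        simp only [hc, if_true]
        have e1 : (2 * q + b) % 2 = b % 2 := by omega
        have e2 : (2 * q + b) / 2 = q := by omega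
        rw [e1, e2]
      · rw [if_neg hc] at h
        have hk : kAl (c :: rest) = kAl rest := by rw [kAl_cons, if_neg hc]
        rw [hk]
        simp only [decode_cons, ih q r h]
        simp [hc]

theorem product_eq (l : List Char) :
    productC (l.map optsA) = (List.range (2 ^ kAl l)).map (fun i => (decode l i).1) := by
  induction l with
  | nil => rfl
  | cons c rest ih =>
      rw [List.map_cons]
      have hP : productC (optsA c :: rest.map optsA)
          = (optsA c).flatMap (fun o => (productC (rest.map optsA)).map (o :: ·)) := rfl
      rw [hP, ih]
      by_cases hc : PySem.Chars.isalpha c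
      · have ho : optsA c = [PySem.Chars.lowerChar c, PySem.Chars.upperChar c] := by
          simp [optsA, hc]
        have hk : 2 ^ kAl (c :: rest) = 2 ^ kAl rest + 2 ^ kAl rest := by
          rw [kAl_cons, if_pos hc, pow_succ]; ring
        rw [ho, hk, List.range_add]
        simp only [List.flatMap_cons, List.flatMap_nil, List.append_nil,
          List.map_append, List.map_map]
        congr 1
        · apply List.map_congr_left
          intro i hi
          have hi' : i < 2 ^ kAl rest := List.mem_range.mp hi
          have h0 := decode_split rest 0 i hi'
          simp only [Nat.zero_mul, Nat.zero_add] at h0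
          have h02 : (decode rest i).2 = 0 := by rw [h0]
          simp [decode_cons, h02, hc]
        · apply List.map_congr_left
          intro i hi
          have hi' : i < 2 ^ kAl rest := List.mem_range.mp hi
          have h1 := decode_split rest 1 i hi'
          simp only [Nat.one_mul] at h1
          simp [decode_cons, h1, hc]
      · have ho : optsA c = [c] := by simp [optsA, hc]
        have hk : kAl (c :: rest) = kAl rest := by rw [kAl_cons, if_neg hc]
        rw [ho, hk]
        simp only [List.flatMap_cons, List.flatMap_nil, List.append_nil, List.map_map]
        apply List.map_congr_left
        intro i _
        simp [decode_cons, hc]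

theorem loopA_eq (domain : List Char) (limit : Int) (combos : List (List Char)) :
    ∀ res : List String,
      loopA domain limit combos res =
        res ++ (combos.take (max (limit - res.length).toNat 1)).map
          (fun c => String.mk (c ++ '@' :: domain)) := by
  induction combos with
  | nil => intro res; simp [loopA]
  | cons c rest ih =>
      intro res
      simp only [loopA]
      by_cases h : limit ≤ ((res ++ [String.mk (c ++ '@' :: domain)]).length : Int)
      · rw [if_pos h]
        simp only [List.length_append, List.length_cons, List.length_nil] at h
        have hn : max (limit - res.length).toNat 1 = 1 := by omega
        rw [hn]
        simp
      · rw [if_neg h]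
        rw [ih]
        simp only [List.length_append, List.length_cons, List.length_nil] at h ⊢
        push_neg at h
        have hn : max (limit - res.length).toNat 1 =
            max (limit - (res.length + 1 : Nat)).toNat 1 + 1 := by
          push_cast
          omega
        rw [hn, List.take_succ_cons]
        simp

-- the foldl in port B computes decode (with the variant accumulated in reverse)
theorem foldl_decode (cs : List Char) :
    ∀ (rev : List Char) (j : Nat),
      cs.reverse.foldl
        (fun (acc : List Char × Nat) c =>
          if PySem.Chars.isalpha c then
            (acc.1 ++ [if acc.2 % 2 = 1 then PySem.Chars.upperChar c else PySem.Chars.lowerChar c],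
             acc.2 / 2)
          else (acc.1 ++ [c], acc.2))
        (rev, j) = (rev ++ (decode cs j).1.reverse, (decode cs j).2) := by
  induction cs with
  | nil => intro rev j; simp [decode]
  | cons c rest ih =>
      intro rev j
      simp only [List.reverse_cons, List.foldl_append, List.foldl_cons, List.foldl_nil, ih]
      by_cases hc : PySem.Chars.isalpha c
      · simp [decode, hc]
      · simp [decode, hc]

-- the bodies of the two ports agree for any split result
theorem body_eq (lo dom : String) (limit : Int) :
    loopA dom.toList limit (productC (lo.toList.map optsA)) [] =
      (List.range (min ((2 : Int) ^ ((lo.toList.filter PySem.Chars.isalpha).length))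
          (max limit 1)).toNat).map (fun i =>
        let p := lo.toList.reverse.foldl
          (fun (acc : List Char × Nat) c =>
            if PySem.Chars.isalpha c then
              (acc.1 ++ [if acc.2 % 2 = 1 then PySem.Chars.upperChar c else PySem.Chars.lowerChar c],
               acc.2 / 2)
            else (acc.1 ++ [c], acc.2))
          ([], i)
        String.mk (p.1.reverse ++ '@' :: dom.toList)) := by
  rw [loopA_eq, product_eq]
  simp only [List.nil_append, List.length_nil, Nat.cast_zero, sub_zero]
  have hcount : (min ((2 : Int) ^ kAl lo.toList) (max limit 1)).toNat =
      min (max limit.toNat 1) (2 ^ kAl lo.toList) := by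
    have hT : ((2 ^ kAl lo.toList : Nat) : Int) = (2 : Int) ^ kAl lo.toList := by
      push_cast; ring
    rw [← hT]
    generalize (2 ^ kAl lo.toList : Nat) = T
    omega
  show _ = (List.range (min ((2 : Int) ^ kAl lo.toList) (max limit 1)).toNat).map _
  rw [hcount, ← List.take_range, ← List.map_take, List.map_map]
  apply List.map_congr_left
  intro i _
  simp only [Function.comp_apply, foldl_decode, List.nil_append, List.reverse_reverse]

-- ===== VERDICT (by name: the statement is the Claim_ definition above) =====
theorem generate_spec : Claim_equal_generate := by
  intro email limit _ _
  unfold Spec_generate generate generate_alt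
  cases h : PySem.Str.splitMax? email "@" 1 with
  | none => rfl
  | some parts =>
      match parts with
      | [] => rfl
      | [_] => rfl
      | lo :: dom :: x :: xs => rfl
      | [lo, dom] => exact body_eq lo dom limit
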